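-- pv_equiv track=rewrite | github.com/zhu-jl18/novel-proofer | tests/support/corpus_cases.py | count_trailing_blank_lines
-- ===== SOURCE A (Python) =====
-- def count_trailing_blank_lines(text: str) -> int:
--     lines = text.splitlines()
--     n = 0
--     for line in reversed(lines):
--         if line.strip() != "":
--             break
--         n += 1
--     return n
-- ===== SOURCE B (Python) =====
-- def count_trailing_blank_lines(text: str) -> int:
--     lines = text.splitlines()
--     last = -1
--     for i, line in enumerate(lines):
--         if line.strip() != "":
--             last = i
--     return len(lines) - 1 - last
-- ===== Notes on version B (the rewrite author's own statement) =====
-- stated objective: alternative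
-- what changed: Replaces the reversed early-exit counting loop with a forward enumerate pass that records the index of the last non-blank line and derives the trailing-blank count arithmetically as len(lines)-1-last.
import Mathlib
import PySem

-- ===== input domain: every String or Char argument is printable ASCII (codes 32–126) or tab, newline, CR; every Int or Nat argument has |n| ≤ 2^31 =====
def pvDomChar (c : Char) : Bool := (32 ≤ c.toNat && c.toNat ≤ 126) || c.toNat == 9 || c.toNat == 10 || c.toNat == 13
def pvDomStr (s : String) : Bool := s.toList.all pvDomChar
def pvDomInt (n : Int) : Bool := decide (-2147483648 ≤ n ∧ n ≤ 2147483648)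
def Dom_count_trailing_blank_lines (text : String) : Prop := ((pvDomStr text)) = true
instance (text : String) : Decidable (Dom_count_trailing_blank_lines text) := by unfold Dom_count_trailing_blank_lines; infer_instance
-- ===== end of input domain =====

-- B replaces A's reversed early-exit counting loop by a forward pass recording the
-- last non-blank line index and returning len(lines)-1-last; same return value everywhere.
-- ===== PORT A =====
-- the 'for line in reversed(lines): if … break; n += 1' loop, carrying n
def pvCountLoop : Int → List String → Int
  | n, [] => n
  | n, line :: rest =>
      if PySem.Str.strip line ≠ "" then n else pvCountLoop (n + 1) rest

def count_trailing_blank_lines (text : String) : Int :=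
  let lines := PySem.Str.splitlines text
  pvCountLoop 0 lines.reverse

-- ===== PORT B =====
def count_trailing_blank_lines_alt (text : String) : Int :=
  let lines := PySem.Str.splitlines text
  let last := (PySem.List.enumerate lines).foldl
      (fun last p => if PySem.Str.strip p.2 ≠ "" then p.1 else last) (-1)
  (lines.length : Int) - 1 - last

-- ===== PRECONDITION & SPEC =====
def Spec_count_trailing_blank_lines (text : String) (out : Int) : Prop := out = count_trailing_blank_lines_alt text
instance (text : String) (out : Int) : Decidable (Spec_count_trailing_blank_lines text out) := by unfold Spec_count_trailing_blank_lines; infer_instance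

-- ===== CLAIM (what is proved, stated in full; the proofs are below) =====
def Claim_equal_count_trailing_blank_lines : Prop := ∀ (text : String), Dom_count_trailing_blank_lines text → Spec_count_trailing_blank_lines text (count_trailing_blank_lines text)

-- ===== LEMMAS AND PROOFS =====

-- shift lemma for A's loop accumulator
theorem pvCountLoop_shift (n : Int) (ls : List String) :
    pvCountLoop n ls = n + pvCountLoop 0 ls := by
  induction ls generalizing n with
  | nil => simp [pvCountLoop]
  | cons l rest ih =>
      simp only [pvCountLoop]
      split
      · simp
      · rw [ih (n+1), ih (0+1)]; ring

-- the core correspondence, by reverse induction on the line list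
theorem pvCore (ls : List String) :
    (ls.length : Int) - 1 -
      (PySem.List.enumerate ls).foldl
        (fun last p => if PySem.Str.strip p.2 ≠ "" then p.1 else last) (-1)
    = pvCountLoop 0 ls.reverse := by
  induction ls using List.reverseRecOn with
  | nil => simp [PySem.List.enumerate, pvCountLoop]
  | append_singleton ls x ih =>
      rw [PySem.List.enumerate_append, List.foldl_append]
      simp only [PySem.List.enumerate_cons, PySem.List.enumerate_nil, List.foldl_cons,
        List.foldl_nil, List.reverse_append, List.reverse_singleton, List.singleton_append,
        List.length_append, List.length_singleton, pvCountLoop]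
      split
      · push_cast; omega
      · rw [pvCountLoop_shift, ← ih]; push_cast; ring

-- ===== VERDICT (by name: the statement is the Claim_ definition above) =====
theorem count_trailing_blank_lines_spec : Claim_equal_count_trailing_blank_lines := by
  intro text _
  unfold Spec_count_trailing_blank_lines count_trailing_blank_lines count_trailing_blank_lines_alt
  exact (pvCore (PySem.Str.splitlines text)).symm
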